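-- pv_equiv track=rewrite | github.com/graymicrolab/BLASTer | BLASTer.py | get_species
-- ===== SOURCE A (Python) =====
-- def get_species(title):
--     """From a GenBank identifier line, extracts the full species and strain name."""
--     in_name = 0
--     species = ""
--     if "MULTISPECIES" in title:
--         species = "MULTISPECIES CONSENSUS"
--     else:
--         for character in title:
--             if character in "[]":
--                 in_name = in_name + 1
--             elif in_name == 1:
--                 species = species + character
--             elif in_name >= 2:
--                 break
--     return species
-- ===== SOURCE B (Python) =====
-- def get_species(title):
--     """From a GenBank identifier line, extracts the full species and strain name."""
--     if "MULTISPECIES" in title: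
--         return "MULTISPECIES CONSENSUS"
--     start = next((i for i, c in enumerate(title) if c in "[]"), -1)
--     if start == -1:
--         return ""
--     stop = next((i for i in range(start + 1, len(title)) if title[i] in "[]"), len(title))
--     return title[start + 1:stop]
-- ===== Notes on version B (the rewrite author's own statement) =====
-- stated objective: simpler
-- what changed: Replaces A's single-pass character loop with a bracket counter and string accumulator by locating the first bracket index and the next bracket index, then returning the slice between them (no accumulator, no per-character state machine).
import Mathlib
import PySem

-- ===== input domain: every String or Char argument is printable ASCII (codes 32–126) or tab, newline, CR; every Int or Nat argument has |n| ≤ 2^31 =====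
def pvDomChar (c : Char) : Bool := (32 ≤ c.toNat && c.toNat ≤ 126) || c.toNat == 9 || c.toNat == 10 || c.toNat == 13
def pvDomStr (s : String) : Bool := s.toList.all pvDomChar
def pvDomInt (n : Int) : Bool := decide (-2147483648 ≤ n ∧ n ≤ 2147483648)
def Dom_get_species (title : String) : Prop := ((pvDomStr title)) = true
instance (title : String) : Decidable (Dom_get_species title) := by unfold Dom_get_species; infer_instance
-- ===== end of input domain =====

-- B replaces A's character-by-character counter loop by locating the first bracket index,
-- then the next bracket index, and slicing between them (objective: simpler).


-- ===== PORT A =====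
-- 'character in "[]"'
def pvIsBr (c : Char) : Bool := c = '[' || c = ']'

-- the for-loop of A, with its 'break'
def getSpeciesLoopA : List Char → Int → List Char → List Char
  | [], _, species => species
  | c :: rest, in_name, species =>
    if pvIsBr c then getSpeciesLoopA rest (in_name + 1) species
    else if in_name = 1 then getSpeciesLoopA rest in_name (species ++ [c])
    else if in_name ≥ 2 then species
    else getSpeciesLoopA rest in_name species

def get_species (title : String) : String :=
  if PySem.Str.isIn "MULTISPECIES" title then "MULTISPECIES CONSENSUS"
  else String.ofList (getSpeciesLoopA title.toList 0 [])

-- ===== PORT B =====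
def get_species_alt (title : String) : String :=
  if PySem.Str.isIn "MULTISPECIES" title then "MULTISPECIES CONSENSUS"
  else
    let chars := title.toList
    match chars.findIdx? pvIsBr with          -- next((i for i,c in enumerate(title) if c in "[]"), -1)
    | none => ""
    | some start =>
      -- next bracket index searched from start+1 (Source B's index-range scan, as findIdx? on the dropped suffix)
      let stop : Nat :=
        match (chars.drop (start + 1)).findIdx? pvIsBr with
        | none => chars.length
        | some j => start + 1 + j
      String.ofList (PySem.List.slice chars (some ((start + 1 : Nat) : Int)) (some (Nat.cast stop : Int)))

-- ===== PRECONDITION & SPEC =====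
def Spec_get_species (title : String) (out : String) : Prop := out = get_species_alt title
instance (title : String) (out : String) : Decidable (Spec_get_species title out) := by unfold Spec_get_species; infer_instance

-- ===== CLAIM (what is proved, stated in full; the proofs are below) =====
def Claim_equal_get_species : Prop := ∀ (title : String), Dom_get_species title → Spec_get_species title (get_species title)

-- ===== LEMMAS AND PROOFS =====
theorem loopA_ge2 (l : List Char) (n : Int) (s : List Char) (h : 2 ≤ n) :
    getSpeciesLoopA l n s = s := by
  induction l generalizing n with
  | nil => rfl
  | cons c rest ih =>
    simp only [getSpeciesLoopA]
    by_cases hb : pvIsBr c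
    · rw [if_pos hb]; exact ih (n + 1) (by omega)
    · rw [if_neg hb, if_neg (by omega : ¬ n = 1), if_pos (by omega : n ≥ 2)]

theorem loopA_one (l : List Char) (s : List Char) :
    getSpeciesLoopA l 1 s = s ++ l.takeWhile (fun c => !pvIsBr c) := by
  induction l generalizing s with
  | nil => simp [getSpeciesLoopA]
  | cons c rest ih =>
    simp only [getSpeciesLoopA, List.takeWhile_cons]
    by_cases hb : pvIsBr c
    · simp [hb, loopA_ge2 rest 2 s (by omega)]
    · simp [hb, ih]

theorem loopA_zero (l : List Char) :
    getSpeciesLoopA l 0 [] =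
      match l.findIdx? pvIsBr with
      | none => []
      | some i => (l.drop (i + 1)).takeWhile (fun c => !pvIsBr c) := by
  induction l with
  | nil => rfl
  | cons c rest ih =>
    simp only [getSpeciesLoopA, List.findIdx?_cons]
    by_cases hb : pvIsBr c
    · simp [hb, loopA_one]
    · simp only [hb, if_neg (by omega : ¬ ((0:Int)) = 1), if_neg (by omega : ¬ ((0:Int)) ≥ 2), ih]
      cases h : rest.findIdx? pvIsBr <;> simp

theorem takeWhile_of_findIdx?_none {p : Char → Bool} (l : List Char)
    (h : l.findIdx? p = none) : l.takeWhile (fun c => !p c) = l := by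
  induction l with
  | nil => rfl
  | cons c rest ih =>
    simp only [List.findIdx?_cons] at h
    by_cases hc : p c = true
    · rw [if_pos hc] at h; exact absurd h (by simp)
    · rw [if_neg hc] at h
      simp only [Option.map_eq_none_iff] at h
      simp [hc, ih h]

theorem takeWhile_of_findIdx?_some {p : Char → Bool} (l : List Char) (j : Nat)
    (h : l.findIdx? p = some j) : l.takeWhile (fun c => !p c) = l.take j := by
  induction l generalizing j with
  | nil => simp at h
  | cons c rest ih =>
    simp only [List.findIdx?_cons] at h
    by_cases hc : p c = true
    · rw [if_pos hc] at h
      simp at h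
      simp [hc, ← h]
    · rw [if_neg hc] at h
      cases hr : rest.findIdx? p with
      | none => simp [hr] at h
      | some j' =>
        simp [hr] at h
        subst h
        simp [hc, ih j' hr]

-- ===== VERDICT (by name: the statement is the Claim_ definition above) =====
theorem get_species_spec : Claim_equal_get_species := by
  intro title _
  unfold Spec_get_species get_species get_species_alt
  by_cases hm : PySem.Str.isIn "MULTISPECIES" title = true
  · rw [if_pos hm, if_pos hm]
  · rw [if_neg hm, if_neg hm, loopA_zero]
    cases h : title.toList.findIdx? pvIsBr with
    | none => simp [h]
    | some start =>
      simp only [h]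
      cases h2 : (title.toList.drop (start + 1)).findIdx? pvIsBr with
      | none =>
        rw [takeWhile_of_findIdx?_none _ h2, PySem.List.slice_natCast,
          List.take_of_length_le (by simp [List.length_drop])]
      | some j =>
        rw [takeWhile_of_findIdx?_some _ j h2, PySem.List.slice_natCast]
        congr 1
        simp
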